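-- pv_equiv track=rewrite | github.com/aws/thinkbox-xmesh-my | scripts/createXMeshLoader.py | stripFrameNumber
-- ===== SOURCE A (Python) =====
-- import string
--
-- def stripFrameNumber(s):
--     gotDecimalPoint = False
--     while len(s):
--         if s[-1].isdigit():
--             s = s.rstrip(string.digits)
--         elif s[-1] == '#':
--             s = s.rstrip('#')
--         elif s[-1] == '-':
--             return s[:-1]
--         elif s[-1] == ',':
--             if gotDecimalPoint:
--                 return s
--             else:
--                 gotDecimalPoint = True
--                 s = s[:-1]
--         else:
--             return s
-- ===== SOURCE B (Python) =====
-- import string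
--
-- def stripFrameNumber(s):
--     # single forward scan over the reversed string; no repeated slicing/rstrip
--     r = s[::-1]
--     n = len(s)
--     i = 0
--     gotDecimalPoint = False
--     while i < n:
--         c = r[i]
--         if c in string.digits:
--             while i < n and r[i] in string.digits:
--                 i += 1
--         elif c == '#':
--             while i < n and r[i] == '#':
--                 i += 1
--         elif c == '-':
--             return s[:n - i - 1]
--         elif c == ',':
--             if gotDecimalPoint:
--                 return s[:n - i]
--             gotDecimalPoint = True
--             i += 1
--         else:
--             return s[:n - i]
--     return None
-- ===== Notes on version B (the rewrite author's own statement) =====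
-- stated objective: alternative
-- what changed: A repeatedly rebuilds the string with rstrip and slicing inside its while-loop; B reverses the string once and does a single forward index scan, slicing only once at the return point (asymptotically O(n) vs A's worst-case O(n^2) slicing, but A's C-level rstrip makes wall-clock differences unmeasurable).
import Mathlib
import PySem

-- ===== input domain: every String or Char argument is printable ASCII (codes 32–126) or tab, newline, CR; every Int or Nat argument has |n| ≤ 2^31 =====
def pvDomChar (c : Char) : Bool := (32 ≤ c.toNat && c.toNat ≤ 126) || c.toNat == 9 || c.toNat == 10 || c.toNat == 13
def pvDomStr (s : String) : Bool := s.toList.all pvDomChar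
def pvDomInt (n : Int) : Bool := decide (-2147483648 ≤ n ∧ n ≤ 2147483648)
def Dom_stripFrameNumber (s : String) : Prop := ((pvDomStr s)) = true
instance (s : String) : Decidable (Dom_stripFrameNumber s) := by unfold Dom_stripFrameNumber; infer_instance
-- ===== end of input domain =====

-- B replaces A's repeated rstrip/slice loop by a single backward scan over the
-- reversed character list (objective: a different, single-pass algorithm).

-- ===== PORT A =====
-- helper lemma cited by the ports' decreasing_by
theorem reverse_eq_of_getLast? {l : List Char} {c : Char} (h : l.getLast? = some c) :
    l.reverse = c :: l.dropLast.reverse := by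
  cases hl : l.reverse with
  | nil =>
    have : l = [] := by simpa using congrArg List.reverse hl
    simp [this] at h
  | cons a t =>
    have hl' : l = t.reverse ++ [a] := by
      have := congrArg List.reverse hl; simpa using this
    rw [List.getLast?_eq_head?_reverse, hl] at h
    simp at h
    simp [hl', h, List.dropLast_concat]

-- Python rstrip(set): drop the trailing characters satisfying p.
-- On the ASCII domain, `isdigit()` and membership in `string.digits` both mean Char.isDigit (exact on Dom).
def pyRstrip (l : List Char) (p : Char → Bool) : List Char :=
  (l.reverse.dropWhile p).reverse

-- the while-loop of A, on the character list; state = (current s, gotDecimalPoint)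
def stripALoop (l : List Char) (got : Bool) : Option (List Char) :=
  match h : l.getLast? with
  | none => none                        -- len(s) == 0: fall out of the loop, implicit None
  | some c =>
    if c.isDigit then
      stripALoop (pyRstrip l (fun ch => ch.isDigit)) got
    else if c = '#' then
      stripALoop (pyRstrip l (fun ch => ch = '#')) got
    else if c = '-' then
      some l.dropLast                   -- s[:-1]
    else if c = ',' then
      if got then some l
      else stripALoop l.dropLast true
    else
      some l
  termination_by l.length
  decreasing_by
  · have hl : l ≠ [] := by intro h'; simp [h'] at h
    have hrev := reverse_eq_of_getLast? h
    have hd : c.isDigit = true := by assumption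
    simp [pyRstrip, hrev, hd]
    have h1 : (List.dropWhile (fun ch => ch.isDigit) l.dropLast.reverse).length
        ≤ l.dropLast.reverse.length := List.length_dropWhile_le _ _
    have h2 : l.dropLast.length < l.length := by
      cases l with
      | nil => exact absurd rfl hl
      | cons a t => simp
    simp at *
    omega
  · have hl : l ≠ [] := by intro h'; simp [h'] at h
    have hrev := reverse_eq_of_getLast? h
    have hc : c = '#' := by assumption
    simp [pyRstrip, hrev, hc]
    have h1 : (List.dropWhile (fun ch => decide (ch = '#')) l.dropLast.reverse).length
        ≤ l.dropLast.reverse.length := List.length_dropWhile_le _ _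
    have h2 : l.dropLast.length < l.length := by
      cases l with
      | nil => exact absurd rfl hl
      | cons a t => simp
    simp at *
    omega
  · have hl : l ≠ [] := by intro h'; simp [h'] at h
    cases l with
    | nil => exact absurd rfl hl
    | cons a t => simp

def stripFrameNumber (s : String) : Option String :=
  (stripALoop s.toList false).map String.ofList

-- ===== PORT B =====
-- the scan of B: r = the not-yet-examined reversed suffix of the original s;
-- s[:n-i] = s.take r.length at each return point.
def stripBLoop (s : List Char) : List Char → Bool → Option (List Char)
  | [], _ => none
  | c :: rest, got =>
    if c.isDigit then
      stripBLoop s (rest.dropWhile (fun ch => ch.isDigit)) got   -- inner while over digits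
    else if c = '#' then
      stripBLoop s (rest.dropWhile (fun ch => ch = '#')) got     -- inner while over '#'
    else if c = '-' then
      some (s.take rest.length)                                  -- s[:n-i-1]
    else if c = ',' then
      if got then some (s.take (rest.length + 1))                -- s[:n-i]
      else stripBLoop s rest true
    else
      some (s.take (rest.length + 1))                            -- s[:n-i]
  termination_by r => r.length
  decreasing_by
  · have := List.length_dropWhile_le (fun ch => ch.isDigit) rest; simp at *; omega
  · have := List.length_dropWhile_le (fun ch => decide (ch = '#')) rest; simp at *; omega
  · simp

def stripFrameNumber_alt (s : String) : Option String :=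
  (stripBLoop s.toList s.toList.reverse false).map String.ofList

-- ===== PRECONDITION & SPEC =====
def Spec_stripFrameNumber (s : String) (out : Option String) : Prop := out = stripFrameNumber_alt s
instance (s : String) (out : Option String) : Decidable (Spec_stripFrameNumber s out) := by unfold Spec_stripFrameNumber; infer_instance

-- ===== CLAIM (what is proved, stated in full; the proofs are below) =====
def Claim_equal_stripFrameNumber : Prop := ∀ (s : String), Dom_stripFrameNumber s → Spec_stripFrameNumber s (stripFrameNumber s)

-- ===== LEMMAS AND PROOFS =====

-- A's current string is always a prefix of the original; B scans the reverse of it.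
set_option maxRecDepth 4000 in
theorem key : ∀ (n : Nat) (l s : List Char) (got : Bool), l.length ≤ n → l <+: s →
    stripALoop l got = stripBLoop s l.reverse got := by
  intro n
  induction n with
  | zero =>
    intro l s got hn _
    have : l = [] := List.eq_nil_of_length_eq_zero (Nat.le_zero.mp hn)
    subst this
    simp [stripALoop, stripBLoop]
  | succ n ih =>
    intro l s got hn hpre
    cases hl : l.getLast? with
    | none =>
      have : l = [] := by simpa using hl
      subst this
      simp [stripALoop, stripBLoop]
    | some c =>
      have hne : l ≠ [] := by intro h'; simp [h'] at hl
      have hrev := reverse_eq_of_getLast? hl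
      have hlen : l.dropLast.length + 1 = l.length := by
        cases l with
        | nil => exact absurd rfl hne
        | cons a t => simp
      have hdrop_pre : l.dropLast <+: s :=
        (List.dropLast_prefix l).trans hpre
      rw [stripALoop, hrev, stripBLoop]
      rw [hl]
      by_cases hd : c.isDigit
      · simp only [hd, if_true]
        have harg : pyRstrip l (fun ch => ch.isDigit)
            = (l.dropLast.reverse.dropWhile (fun ch => ch.isDigit)).reverse := by
          simp [pyRstrip, hrev, hd]
        have hsuf : (l.dropLast.reverse.dropWhile (fun ch => ch.isDigit)) <:+ l.reverse := by
          rw [hrev]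
          exact (List.dropWhile_suffix _).trans (List.suffix_cons _ _)
        have hpre' : (l.dropLast.reverse.dropWhile (fun ch => ch.isDigit)).reverse <+: s := by
          refine List.IsPrefix.trans ?_ hpre
          have := List.reverse_prefix.mpr hsuf
          simpa using this
        have hlen' : (l.dropLast.reverse.dropWhile (fun ch => ch.isDigit)).reverse.length ≤ n := by
          have := List.length_dropWhile_le (fun ch => ch.isDigit) l.dropLast.reverse
          simp at *
          omega
        rw [harg, ih _ s got hlen' hpre']
        simp
      · simp only [hd, if_false]
        by_cases hh : c = '#'
        · simp only [hh, if_true, decide_true, Bool.false_eq_true]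
          have harg : pyRstrip l (fun ch => ch = '#')
              = (l.dropLast.reverse.dropWhile (fun ch => ch = '#')).reverse := by
            simp [pyRstrip, hrev, hh]
          have hsuf : (l.dropLast.reverse.dropWhile (fun ch => (ch = '#' : Bool))) <:+ l.reverse := by
            rw [hrev]
            exact (List.dropWhile_suffix _).trans (List.suffix_cons _ _)
          have hpre' : (l.dropLast.reverse.dropWhile (fun ch => (ch = '#' : Bool))).reverse <+: s := by
            refine List.IsPrefix.trans ?_ hpre
            have := List.reverse_prefix.mpr hsuf
            simpa using this
          have hlen' : (l.dropLast.reverse.dropWhile (fun ch => (ch = '#' : Bool))).reverse.length ≤ n := by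
            have := List.length_dropWhile_le (fun ch => (ch = '#' : Bool)) l.dropLast.reverse
            simp at *
            omega
          rw [harg, ih _ s got hlen' hpre']
          simp
        · simp only [hh, if_false]
          have htake : s.take l.dropLast.length = l.dropLast :=
            (List.prefix_iff_eq_take.mp hdrop_pre).symm
          have htake1 : s.take (l.dropLast.length + 1) = l := by
            have := List.prefix_iff_eq_take.mp hpre
            rw [← hlen] at this
            exact this.symm
          by_cases hm : c = '-'
          · subst hm
            rw [if_pos rfl, if_pos rfl, List.length_reverse, htake]
            simp
          · simp only [hm, if_false, decide_eq_true_eq]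
            by_cases hcm : c = ','
            · simp only [hcm, if_true]
              cases got with
              | true =>
                have e : l.length - 1 + 1 = l.dropLast.length + 1 := by omega
                simp [e, htake1]
              | false =>
                simp only [Bool.false_eq_true, if_false]
                rw [ih l.dropLast s true (by omega) hdrop_pre]
            · have e : l.length - 1 + 1 = l.dropLast.length + 1 := by omega
              simp [hcm, e, htake1]

-- ===== VERDICT (by name: the statement is the Claim_ definition above) =====
theorem stripFrameNumber_spec : Claim_equal_stripFrameNumber := by
  intro s _
  unfold Spec_stripFrameNumber stripFrameNumber stripFrameNumber_alt
  rw [key s.toList.length s.toList s.toList false le_rfl (List.prefix_refl _)]
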